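-- pv_equiv track=rewrite | github.com/connerwarnock/Genomic-Project-Clustering-Graphs-and-More- | Genomics.py | create_comm_matrix
-- ===== SOURCE A (Python) =====
-- def create_comm_matrix(hubs, communities, normLinkEdges):
--     commMatrixes = []
--     commMatrixRow = []
--     commMatrix = []
--
--     for s in range(0, len(communities)):
--         commMatrix.clear()
--         for i in range(0, 81):
--             commMatrixRow.clear()
--             for j in range(0, 81):
--                 foundi = False
--                 foundj = False
--                 foundEdge = False
--                 for k in range(0, len(communities[s])):
--                     if communities[s][k] == i:
--                         foundi = True
--                     if communities[s][k] == j: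
--                         foundj = True
--                     if foundi == True and foundj == True:
--                         break
--                 if foundi == True and foundj == True:
--                     for n in range(0, len(normLinkEdges)):
--                         for m in range(0, len(normLinkEdges[n])):
--                             x, y = normLinkEdges[n][m]
--                             if x == i and y == j:
--                                 foundEdge = True
--                                 break
--                         if foundEdge == True:
--                             break
--                 if foundEdge == True:
--                     commMatrixRow.append(1)
--                 else:
--                     commMatrixRow.append(0)
--             commMatrix.append(commMatrixRow[:])
--         commMatrixes.append(commMatrix[:])
--
--
--
--     return commMatrixes
-- ===== SOURCE B (Python) =====
-- def create_comm_matrix(hubs, communities, normLinkEdges):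
--     result = []
--     for comm in communities:
--         members = set(comm)
--         mat = [[0] * 81 for _ in range(81)]
--         for group in normLinkEdges:
--             for (x, y) in group:
--                 if x in members and y in members and 0 <= x < 81 and 0 <= y < 81:
--                     mat[x][y] = 1
--         result.append(mat)
--     return result
-- ===== Notes on version B (the rewrite author's own statement) =====
-- stated objective: faster
-- what changed: Instead of scanning the community list and the whole edge list for each of the 81*81 cells, B builds one membership set and a zero 81x81 matrix per community and scatters each edge (x,y) with both endpoints in the community and in range(81) into the matrix in a single pass.
import Mathlib
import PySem

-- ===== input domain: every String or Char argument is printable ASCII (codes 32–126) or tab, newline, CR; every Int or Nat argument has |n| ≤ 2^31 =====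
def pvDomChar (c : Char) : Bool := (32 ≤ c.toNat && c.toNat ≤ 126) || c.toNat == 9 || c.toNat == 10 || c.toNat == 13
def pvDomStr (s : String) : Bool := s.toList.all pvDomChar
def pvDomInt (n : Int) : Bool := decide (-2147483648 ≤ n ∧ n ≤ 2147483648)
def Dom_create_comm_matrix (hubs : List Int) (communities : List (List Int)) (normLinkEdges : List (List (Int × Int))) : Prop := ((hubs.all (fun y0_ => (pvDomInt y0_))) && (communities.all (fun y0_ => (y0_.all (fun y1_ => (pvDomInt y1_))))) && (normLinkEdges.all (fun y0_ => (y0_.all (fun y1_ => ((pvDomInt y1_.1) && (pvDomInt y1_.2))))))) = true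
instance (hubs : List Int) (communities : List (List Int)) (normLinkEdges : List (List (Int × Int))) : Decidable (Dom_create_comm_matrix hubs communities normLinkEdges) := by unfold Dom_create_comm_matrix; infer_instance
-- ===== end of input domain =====

-- B replaces A's per-cell scans (searching the community and the whole edge list for each of the
-- 81*81 cells) by one membership set and a single scatter pass over the edges into a zero matrix;
-- objective: faster (per community, O(81^2 + edges) instead of O(81^2 * (community + edges))).


-- ===== PORT A =====
-- the k-loop: scans communities[s] setting foundi/foundj, breaking as soon as both are true
def pvA_kloop (comm : List Int) (i j : Int) (fi fj : Bool) : Bool × Bool :=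
  match comm with
  | [] => (fi, fj)
  | c :: rest =>
    let fi' := fi || (c == i)
    let fj' := fj || (c == j)
    if fi' && fj' then (fi', fj') else pvA_kloop rest i j fi' fj'

-- the m-loop: scans normLinkEdges[n] for the edge (i, j), breaking on the first hit
def pvA_mloop (row : List (Int × Int)) (i j : Int) : Bool :=
  match row with
  | [] => false
  | (x, y) :: rest => if x == i && y == j then true else pvA_mloop rest i j

-- the n-loop: scans the edge-row lists, breaking as soon as foundEdge is true
def pvA_nloop (edges : List (List (Int × Int))) (i j : Int) : Bool :=
  match edges with
  | [] => false
  | row :: rest => if pvA_mloop row i j then true else pvA_nloop rest i j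

-- body of the j-loop: the 0/1 appended to commMatrixRow for cell (i, j)
def pvA_cell (comm : List Int) (edges : List (List (Int × Int))) (i j : Int) : Int :=
  let fij := pvA_kloop comm i j false false
  let foundEdge := if fij.1 && fij.2 then pvA_nloop edges i j else false
  if foundEdge then 1 else 0

-- the j-loop: appends 81 cells to the cleared commMatrixRow
def pvA_row (comm : List Int) (edges : List (List (Int × Int))) (i : Int) : List Int :=
  (PySem.List.pyRange 0 81 1).foldl (fun acc j => acc ++ [pvA_cell comm edges i j]) []

-- the i-loop: appends 81 row copies to the cleared commMatrix
def pvA_matrix (comm : List Int) (edges : List (List (Int × Int))) : List (List Int) :=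
  (PySem.List.pyRange 0 81 1).foldl (fun acc i => acc ++ [pvA_row comm edges i]) []

-- the s-loop over range(len(communities)): visits communities[s] in order
def create_comm_matrix (hubs : List Int) (communities : List (List Int)) (normLinkEdges : List (List (Int × Int))) : List (List (List Int)) :=
  communities.foldl (fun acc comm => acc ++ [pvA_matrix comm normLinkEdges]) []

-- ===== PORT B =====
-- mat[x][y] = 1 ; only reached under the guard 0 <= x < 81 and 0 <= y < 81, so toNat is exact
def pvB_set1 (m : List (List Int)) (x y : Int) : List (List Int) :=
  m.modify x.toNat (fun row => row.set y.toNat 1)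

-- body of B's inner edge loop
def pvB_step (members : PySem.Set Int) (m : List (List Int)) (e : Int × Int) : List (List Int) :=
  if members.contains e.1 && members.contains e.2 &&
     decide (0 ≤ e.1) && decide (e.1 < 81) && decide (0 ≤ e.2) && decide (e.2 < 81) then
    pvB_set1 m e.1 e.2
  else m

-- per community: membership set, 81x81 zero matrix, one scatter pass over all edges
def pvB_matrix (comm : List Int) (edges : List (List (Int × Int))) : List (List Int) :=
  let members := PySem.Set.ofList comm
  edges.foldl (fun m group => group.foldl (pvB_step members) m)
    (List.replicate 81 (List.replicate 81 (0 : Int)))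

def create_comm_matrix_alt (hubs : List Int) (communities : List (List Int)) (normLinkEdges : List (List (Int × Int))) : List (List (List Int)) :=
  communities.foldl (fun acc comm => acc ++ [pvB_matrix comm normLinkEdges]) []

-- ===== PRECONDITION & SPEC =====
def Spec_create_comm_matrix (hubs : List Int) (communities : List (List Int)) (normLinkEdges : List (List (Int × Int))) (out : List (List (List Int))) : Prop := out = create_comm_matrix_alt hubs communities normLinkEdges
instance (hubs : List Int) (communities : List (List Int)) (normLinkEdges : List (List (Int × Int))) (out : List (List (List Int))) : Decidable (Spec_create_comm_matrix hubs communities normLinkEdges out) := by unfold Spec_create_comm_matrix; infer_instance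

-- ===== CLAIM (what is proved, stated in full; the proofs are below) =====
def Claim_equal_create_comm_matrix : Prop := ∀ (hubs : List Int) (communities : List (List Int)) (normLinkEdges : List (List (Int × Int))), Dom_create_comm_matrix hubs communities normLinkEdges → Spec_create_comm_matrix hubs communities normLinkEdges (create_comm_matrix hubs communities normLinkEdges)

-- ===== LEMMAS AND PROOFS =====

-- the cell value both sides compute, read at Nat coordinates
def pvCell (m : List (List Int)) (i j : Nat) : Int := (m.getD i []).getD j 0

def pvShape (m : List (List Int)) : Prop := m.length = 81 ∧ ∀ r ∈ m, r.length = 81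

-- the per-edge condition making cell (i, j) become 1 in B
abbrev pvC (comm : List Int) (i j : Nat) (e : Int × Int) : Prop :=
  e.1 = (i : Int) ∧ e.2 = (j : Int) ∧ (i : Int) ∈ comm ∧ (j : Int) ∈ comm

-- ---- A-side characterisation ----

theorem pvBeqComm (a b : Int) : (a == b) = (b == a) := by
  by_cases h : a = b
  · simp [h]
  · have h2 : ¬ b = a := fun hh => h hh.symm
    simp [h, h2]

theorem pvA_kloop_spec (comm : List Int) (i j : Int) :
    ∀ fi fj, pvA_kloop comm i j fi fj = (fi || comm.contains i, fj || comm.contains j) := by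
  induction comm with
  | nil => simp [pvA_kloop]
  | cons c rest ih =>
    intro fi fj
    simp only [pvA_kloop]
    split
    · rename_i h
      simp only [Bool.and_eq_true, Bool.or_eq_true, beq_iff_eq] at h
      simp only [Prod.mk.injEq, List.contains_cons]
      constructor
      · rcases h.1 with h1 | h1 <;> simp [h1]
      · rcases h.2 with h1 | h1 <;> simp [h1]
    · rw [ih]
      simp only [List.contains_cons, Prod.mk.injEq, Bool.or_assoc]
      exact ⟨by rw [pvBeqComm], by rw [pvBeqComm]⟩

theorem pvA_mloop_spec (row : List (Int × Int)) (i j : Int) :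
    pvA_mloop row i j = true ↔ (i, j) ∈ row := by
  induction row with
  | nil => simp [pvA_mloop]
  | cons e rest ih =>
    obtain ⟨x, y⟩ := e
    simp only [pvA_mloop]
    split
    · rename_i h
      simp only [Bool.and_eq_true, beq_iff_eq] at h
      simp [h.1, h.2]
    · rename_i h
      simp only [Bool.and_eq_true, beq_iff_eq] at h
      simp only [List.mem_cons, ih]
      constructor
      · exact Or.inr
      · rintro (h1 | h1)
        · exact absurd ⟨(Prod.ext_iff.mp h1.symm).1, (Prod.ext_iff.mp h1.symm).2⟩ h
        · exact h1

theorem pvA_nloop_spec (edges : List (List (Int × Int))) (i j : Int) :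
    pvA_nloop edges i j = true ↔ (i, j) ∈ edges.flatMap id := by
  induction edges with
  | nil => simp [pvA_nloop]
  | cons row rest ih =>
    simp only [pvA_nloop]
    split
    · rename_i h
      simp [List.flatMap_cons, (pvA_mloop_spec row i j).mp h]
    · rename_i h
      simp only [List.flatMap_cons, List.mem_append, ih, id]
      constructor
      · exact Or.inr
      · rintro (h1 | h1)
        · exact absurd ((pvA_mloop_spec row i j).mpr h1) h
        · exact h1

theorem pvA_cell_spec (comm : List Int) (edges : List (List (Int × Int))) (i j : Int) :
    pvA_cell comm edges i j =
      if i ∈ comm ∧ j ∈ comm ∧ (i, j) ∈ edges.flatMap id then 1 else 0 := by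
  simp only [pvA_cell, pvA_kloop_spec, Bool.false_or]
  by_cases hi : i ∈ comm
  · by_cases hj : j ∈ comm
    · simp only [List.contains_iff_mem.mpr hi, List.contains_iff_mem.mpr hj, Bool.and_self,
        if_true, hi, hj, true_and]
      by_cases he : (i, j) ∈ edges.flatMap id
      · rw [(pvA_nloop_spec edges i j).mpr he, if_pos rfl, if_pos he]
      · have hn : pvA_nloop edges i j = false := by
          rcases h' : pvA_nloop edges i j
          · rfl
          · exact absurd ((pvA_nloop_spec edges i j).mp h') he
        rw [hn]
        rw [if_neg (by simp : ¬ (false = true)), if_neg he]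
    · simp [hj]
  · simp [hi]

-- ---- B-side characterisation ----

theorem pvB_run_flat (members : PySem.Set Int) (edges : List (List (Int × Int))) (m0 : List (List Int)) :
    edges.foldl (fun m group => group.foldl (pvB_step members) m) m0
      = (edges.flatMap id).foldl (pvB_step members) m0 := by
  induction edges generalizing m0 with
  | nil => simp
  | cons g rest ih => simp [List.flatMap_cons, List.foldl_append, ih]

theorem pvB_shape_step (members : PySem.Set Int) (m : List (List Int)) (e : Int × Int)
    (h : pvShape m) : pvShape (pvB_step members m e) := by
  unfold pvB_step
  split
  · unfold pvB_set1
    refine ⟨by simpa using h.1, ?_⟩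
    intro r hr
    rw [List.mem_iff_getElem?] at hr
    obtain ⟨k, hk⟩ := hr
    rw [List.getElem?_modify] at hk
    rcases hmem : m[k]? with _ | row
    · simp [hmem] at hk
    · have hrowm : row ∈ m := List.mem_of_getElem? hmem
      have hlen := h.2 row hrowm
      simp only [hmem] at hk
      split at hk
      · cases hk; simpa using hlen
      · cases hk; exact hlen
  · exact h

theorem pvB_shape_foldl (members : PySem.Set Int) (es : List (Int × Int)) (m0 : List (List Int))
    (h : pvShape m0) : pvShape (es.foldl (pvB_step members) m0) := by
  induction es generalizing m0 with
  | nil => simpa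
  | cons e rest ih => exact ih _ (pvB_shape_step members m0 e h)

theorem pvB_cell_step (comm : List Int) (m : List (List Int)) (e : Int × Int)
    (i j : Nat) (hi : i < 81) (hj : j < 81) (hm : pvShape m) :
    pvCell (pvB_step (PySem.Set.ofList comm) m e) i j
      = if pvC comm i j e then 1 else pvCell m i j := by
  unfold pvB_step pvC
  split
  · rename_i hg
    simp only [Bool.and_eq_true, decide_eq_true_eq] at hg
    obtain ⟨⟨⟨⟨⟨hc1, hc2⟩, h1⟩, h2⟩, h3⟩, h4⟩
      := hg
    have hmem1 : e.1 ∈ comm := (PySem.Set.mem_ofList _ _).mp ((PySem.Set.contains_iff _ _).mp hc1)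
    have hmem2 : e.2 ∈ comm := (PySem.Set.mem_ofList _ _).mp ((PySem.Set.contains_iff _ _).mp hc2)
    by_cases hx : e.1 = (i : Int)
    · have hxn : e.1.toNat = i := by omega
      have hiL : i < m.length := by rw [hm.1]; exact hi
      have hrlen : m[i].length = 81 := hm.2 _ (List.getElem_mem hiL)
      by_cases hy : e.2 = (j : Int)
      · have hyn : e.2.toNat = j := by omega
        simp [pvCell, pvB_set1, List.getD_eq_getElem?_getD,
              List.getElem?_eq_getElem hiL,
              List.getElem?_set_self (show j < (m[i]).length by omega),
              hx, hy]
        intro hcon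
        exact absurd (hy ▸ hmem2) (hcon (hx ▸ hmem1))
      · have hyn : e.2.toNat ≠ j := by omega
        simp [pvCell, pvB_set1, List.getD_eq_getElem?_getD,
              List.getElem?_eq_getElem hiL, hxn,
              List.getElem?_set_ne hyn, hy]
    · have hxn : e.1.toNat ≠ i := by omega
      simp [pvCell, pvB_set1, List.getD_eq_getElem?_getD, hxn, hx]
  · rename_i hg
    rw [if_neg]
    rintro ⟨hx, hy, hmi, hmj⟩
    apply hg
    simp only [Bool.and_eq_true, decide_eq_true_eq]
    refine ⟨⟨⟨⟨⟨?_, ?_⟩, ?_⟩, ?_⟩, ?_⟩, ?_⟩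
    · exact (PySem.Set.contains_iff _ _).mpr ((PySem.Set.mem_ofList _ _).mpr (hx ▸ hmi))
    · exact (PySem.Set.contains_iff _ _).mpr ((PySem.Set.mem_ofList _ _).mpr (hy ▸ hmj))
    · omega
    · omega
    · omega
    · omega

theorem pvB_cell_foldl (comm : List Int) (es : List (Int × Int)) (m0 : List (List Int))
    (i j : Nat) (hi : i < 81) (hj : j < 81) (hm : pvShape m0) :
    pvCell (es.foldl (pvB_step (PySem.Set.ofList comm)) m0) i j
      = if ∃ e ∈ es, pvC comm i j e then 1 else pvCell m0 i j := by
  induction es generalizing m0 with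
  | nil => simp
  | cons e rest ih =>
    rw [List.foldl_cons, ih _ (pvB_shape_step _ _ _ hm)]
    by_cases hr : ∃ e' ∈ rest, pvC comm i j e'
    · rw [if_pos hr, if_pos]
      obtain ⟨e', he1, he2⟩ := hr
      exact ⟨e', List.mem_cons_of_mem _ he1, he2⟩
    · rw [if_neg hr, pvB_cell_step comm m0 e i j hi hj hm]
      by_cases he : pvC comm i j e
      · rw [if_pos he, if_pos ⟨e, List.mem_cons_self, he⟩]
      · rw [if_neg he, if_neg]
        rintro ⟨e', he1, he2⟩
        rcases List.mem_cons.mp he1 with rfl | h1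
        · exact he he2
        · exact hr ⟨e', h1, he2⟩

theorem pvShape_zero : pvShape (List.replicate 81 (List.replicate 81 (0 : Int))) := by
  constructor
  · simp
  · intro r hr
    rw [List.eq_of_mem_replicate hr]
    simp

theorem pvB_cell_spec (comm : List Int) (edges : List (List (Int × Int)))
    (i j : Nat) (hi : i < 81) (hj : j < 81) :
    pvCell (pvB_matrix comm edges) i j
      = if (i : Int) ∈ comm ∧ (j : Int) ∈ comm ∧ ((i : Int), (j : Int)) ∈ edges.flatMap id
        then 1 else 0 := by
  unfold pvB_matrix
  rw [pvB_run_flat, pvB_cell_foldl comm _ _ i j hi hj pvShape_zero]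
  have hz : pvCell (List.replicate 81 (List.replicate 81 (0 : Int))) i j = 0 := by
    have houter : (List.replicate 81 (List.replicate 81 (0 : Int))).getD i []
        = List.replicate 81 (0 : Int) := by
      rw [List.getD_eq_getElem?_getD, List.getElem?_replicate, if_pos hi, Option.getD_some]
    unfold pvCell
    rw [houter, List.getD_eq_getElem?_getD, List.getElem?_replicate, if_pos hj, Option.getD_some]
  rw [hz]
  congr 1
  unfold pvC
  simp only [eq_iff_iff]
  constructor
  · rintro ⟨e, he, hx, hy, hmi, hmj⟩
    refine ⟨hmi, hmj, ?_⟩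
    have : e = ((i : Int), (j : Int)) := Prod.ext hx hy
    rwa [this] at he
  · rintro ⟨hmi, hmj, he⟩
    exact ⟨_, he, rfl, rfl, hmi, hmj⟩

-- ---- the two matrices agree per community ----

set_option maxHeartbeats 1000000 in
theorem pvMatrix_eq (comm : List Int) (edges : List (List (Int × Int))) :
    pvA_matrix comm edges = pvB_matrix comm edges := by
  have hA : pvA_matrix comm edges
      = (PySem.List.pyRange 0 81 1).map (fun i =>
          (PySem.List.pyRange 0 81 1).map (fun j => pvA_cell comm edges i j)) := by
    unfold pvA_matrix pvA_row
    rw [show ∀ (f : Int → List Int),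
        (PySem.List.pyRange 0 81 1).foldl (fun acc i => acc ++ [f i]) [] =
          (PySem.List.pyRange 0 81 1).map f from fun f => by
        simpa using PySem.List.foldl_append_singleton_eq_map
          (l := PySem.List.pyRange 0 81 1) (f := f) (acc := [])]
    refine List.map_congr_left fun i _ => ?_
    simpa using PySem.List.foldl_append_singleton_eq_map
      (l := PySem.List.pyRange 0 81 1) (f := fun j => pvA_cell comm edges i j) (acc := [])
  have hlenR : (PySem.List.pyRange 0 81 1).length = 81 := by
    simp [PySem.List.length_pyRange_one]
  have hBshape : pvShape (pvB_matrix comm edges) := by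
    unfold pvB_matrix
    rw [pvB_run_flat]
    exact pvB_shape_foldl _ _ _ pvShape_zero
  rw [hA]
  apply List.ext_getElem?
  intro i
  by_cases hi : i < 81
  · have hri : (PySem.List.pyRange 0 81 1)[i]? = some (i : Int) := by
      rw [List.getElem?_eq_getElem (by rw [hlenR]; exact hi)]
      simp [PySem.List.getElem_pyRange_one]
    have hiB : i < (pvB_matrix comm edges).length := by rw [hBshape.1]; exact hi
    rw [List.getElem?_map, hri, Option.map_some, List.getElem?_eq_getElem hiB]
    refine congrArg some ?_
    have hrow : (pvB_matrix comm edges)[i].length = 81 :=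
      hBshape.2 _ (List.getElem_mem hiB)
    apply List.ext_getElem?
    intro j
    by_cases hj : j < 81
    · have hrj : (PySem.List.pyRange 0 81 1)[j]? = some (j : Int) := by
        rw [List.getElem?_eq_getElem (by rw [hlenR]; exact hj)]
        simp [PySem.List.getElem_pyRange_one]
      have hjB : j < (pvB_matrix comm edges)[i].length := by rw [hrow]; exact hj
      rw [List.getElem?_map, hrj, Option.map_some, List.getElem?_eq_getElem hjB]
      refine congrArg some ?_
      have hBcell : (pvB_matrix comm edges)[i][j]'hjB = pvCell (pvB_matrix comm edges) i j := by
        unfold pvCell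
        rw [List.getD_eq_getElem?_getD (l := pvB_matrix comm edges),
            List.getElem?_eq_getElem hiB, Option.getD_some,
            List.getD_eq_getElem?_getD, List.getElem?_eq_getElem hjB, Option.getD_some]
      rw [hBcell, pvB_cell_spec comm edges i j hi hj, pvA_cell_spec]
    · have h1 : (List.map (fun jj => pvA_cell comm edges (i : Int) jj)
          (PySem.List.pyRange 0 81 1))[j]? = none :=
        List.getElem?_eq_none (by simp [hlenR]; omega)
      have h2 : ((pvB_matrix comm edges)[i])[j]? = none :=
        List.getElem?_eq_none (by rw [hrow]; omega)
      rw [h1, h2]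
  · have h1 : ((PySem.List.pyRange 0 81 1).map (fun ii =>
        (PySem.List.pyRange 0 81 1).map (fun jj => pvA_cell comm edges ii jj)))[i]? = none :=
      List.getElem?_eq_none (by simp [hlenR]; omega)
    have h2 : (pvB_matrix comm edges)[i]? = none :=
      List.getElem?_eq_none (by rw [hBshape.1]; omega)
    rw [h1, h2]

-- ===== VERDICT (by name: the statement is the Claim_ definition above) =====
theorem create_comm_matrix_spec : Claim_equal_create_comm_matrix := by
  intro hubs communities normLinkEdges _
  unfold Spec_create_comm_matrix create_comm_matrix create_comm_matrix_alt
  rw [show communities.foldl (fun acc comm => acc ++ [pvA_matrix comm normLinkEdges]) []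
        = communities.map (fun comm => pvA_matrix comm normLinkEdges) from by
      simpa using PySem.List.foldl_append_singleton_eq_map (l := communities)
        (f := fun comm => pvA_matrix comm normLinkEdges) (acc := [])]
  rw [show communities.foldl (fun acc comm => acc ++ [pvB_matrix comm normLinkEdges]) []
        = communities.map (fun comm => pvB_matrix comm normLinkEdges) from by
      simpa using PySem.List.foldl_append_singleton_eq_map (l := communities)
        (f := fun comm => pvB_matrix comm normLinkEdges) (acc := [])]
  exact List.map_congr_left fun comm _ => pvMatrix_eq comm normLinkEdges
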